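-- pv_equiv track=rewrite | github.com/GeoLab-Katana/Project-Roamer | model/reducer/reducer.py | _remove_trashold
-- ===== SOURCE A (Python) =====
-- def _remove_trashold(grid, average):
--     _min = 100000000000
--     for key, val in grid.items():
--         if val < average:
--             grid[key] = 0
--         else:
--             _min = min(grid[key], _min)
--     return _min
-- ===== SOURCE B (Python) =====
-- def _remove_trashold(grid, average):
--     # Sort the original values, then locate the answer by binary search:
--     # the smallest surviving value is the first sorted value >= average.
--     vals = sorted(grid.values())
--     lo, hi = 0, len(vals)
--     while lo < hi:
--         mid = (lo + hi) // 2
--         if vals[mid] < average: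
--             lo = mid + 1
--         else:
--             hi = mid
--     _min = vals[lo] if lo < len(vals) else 100000000000
--     # zeroing pass (same mutation as A); each key is visited once, so grid[key]
--     # is still the original value when it is read.
--     for key in grid:
--         if grid[key] < average:
--             grid[key] = 0
--     return _min
-- ===== Notes on version B (the rewrite author's own statement) =====
-- stated objective: alternative
-- what changed: B replaces A's fused single-pass running-minimum with sort + hand-written lower-bound binary search (the answer is the first sorted value >= average, default 100000000000), followed by an independent zeroing pass.
import Mathlib
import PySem

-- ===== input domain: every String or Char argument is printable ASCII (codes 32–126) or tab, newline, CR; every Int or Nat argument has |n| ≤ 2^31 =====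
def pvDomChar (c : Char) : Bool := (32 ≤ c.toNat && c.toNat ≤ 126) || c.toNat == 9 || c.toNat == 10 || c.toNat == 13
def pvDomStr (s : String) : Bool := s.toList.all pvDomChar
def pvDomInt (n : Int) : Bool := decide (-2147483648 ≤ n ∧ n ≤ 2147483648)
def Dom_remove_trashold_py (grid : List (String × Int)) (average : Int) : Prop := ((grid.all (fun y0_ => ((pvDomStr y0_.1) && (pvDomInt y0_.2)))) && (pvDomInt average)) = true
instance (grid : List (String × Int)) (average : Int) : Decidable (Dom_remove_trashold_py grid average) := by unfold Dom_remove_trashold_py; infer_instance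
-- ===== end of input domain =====

-- B replaces A's fused running-minimum loop by sort + hand-written lower-bound binary search
-- plus a separate zeroing pass (alternative decomposition); return-value equivalence — both
-- programs mutate grid identically (below-average entries set to 0).

-- ===== PORT A =====
-- Literal port of A: the loop threads the mutated dict and the running minimum.
-- In the else branch `grid[key]` equals `val`: dict keys are distinct and only the then-branch
-- of the current iteration assigns, so the entry read has not been modified.
def remove_trashold_py (grid : List (String × Int)) (average : Int) : Int :=
  (grid.foldl
    (fun (st : PySem.Dict String Int × Int) kv =>
      if kv.2 < average then
        (st.1.insert kv.1 0, st.2)                 -- grid[key] = 0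
      else
        (st.1, min kv.2 st.2))                     -- _min = min(grid[key], _min)
    (PySem.Dict.mk grid, 100000000000)).2

-- ===== PORT B =====
-- Literal port of Source B's while-loop (lower-bound binary search). lo and hi are nonnegative
-- throughout in Python, so they are Nat here; `(lo + hi) // 2` on nonnegative ints is Nat
-- division. vals[mid] is always in range (lo < hi ≤ len vals ⇒ mid < len vals), so the
-- total lookup `getD mid 0` reads exactly the element Python reads.
def pvBsearch (vals : List Int) (average : Int) (lo hi : Nat) : Nat :=
  if h : lo < hi then
    let mid := (lo + hi) / 2
    if vals.getD mid 0 < average then pvBsearch vals average (mid + 1) hi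
    else pvBsearch vals average lo mid
  else lo
termination_by hi - lo
decreasing_by all_goals omega

-- Literal port of Source B: sort the original values, binary-search the first value
-- ≥ average, then the zeroing pass (whose result the function does not use), return _min.
def remove_trashold_py_alt (grid : List (String × Int)) (average : Int) : Int :=
  let vals := PySem.List.sorted (grid.map Prod.snd) (fun v => v) false
  let lo := pvBsearch vals average 0 vals.length
  let _min := if h : lo < vals.length then vals[lo] else 100000000000
  -- `for key in grid: if grid[key] < average: grid[key] = 0` — each key visited once, so the
  -- value read is the original one (dict keys are distinct).
  let _grid := grid.foldl (fun g kv => if kv.2 < average then g.insert kv.1 0 else g)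
                 (PySem.Dict.mk grid)
  _min

-- ===== PRECONDITION & SPEC =====
def Spec_remove_trashold_py (grid : List (String × Int)) (average : Int) (out : Int) : Prop := out = remove_trashold_py_alt grid average
instance (grid : List (String × Int)) (average : Int) (out : Int) : Decidable (Spec_remove_trashold_py grid average out) := by unfold Spec_remove_trashold_py; infer_instance

-- ===== CLAIM (what is proved, stated in full; the proofs are below) =====
def Claim_equal_remove_trashold_py : Prop := ∀ (grid : List (String × Int)) (average : Int), Dom_remove_trashold_py grid average → Spec_remove_trashold_py grid average (remove_trashold_py grid average)

-- ===== LEMMAS AND PROOFS =====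

-- A's running minimum does not depend on the mutated-dict component of the state
lemma pvA_snd (average : Int) : ∀ (l : List (String × Int)) (g : PySem.Dict String Int) (m : Int),
    (l.foldl
      (fun (st : PySem.Dict String Int × Int) kv =>
        if kv.2 < average then (st.1.insert kv.1 0, st.2)
        else (st.1, min kv.2 st.2)) (g, m)).2
    = l.foldl (fun a kv => if kv.2 < average then a else min kv.2 a) m := by
  intro l
  induction l with
  | nil => intro g m; rfl
  | cons kv t ih =>
    intro g m
    by_cases h : kv.2 < average <;> simp [List.foldl_cons, h, ih]

-- A's loop over the pairs is the min-fold over the surviving original values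
lemma pvA_filter (average : Int) : ∀ (l : List (String × Int)) (m : Int),
    l.foldl (fun a kv => if kv.2 < average then a else min kv.2 a) m
    = ((l.map Prod.snd).filter (fun v => average ≤ v)).foldl (fun a v => min v a) m := by
  intro l
  induction l with
  | nil => intro m; rfl
  | cons kv t ih =>
    intro m
    by_cases h : kv.2 < average
    · simp only [List.foldl_cons, List.map_cons, List.filter_cons, if_pos h,
        Int.not_le.mpr h, decide_false]
      exact ih m
    · simp only [List.foldl_cons, List.map_cons, List.filter_cons, if_neg h,
        Int.not_lt.mp h, decide_true, ite_true]
      exact ih (min kv.2 m)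

-- the min-fold is invariant under permutation of the list
lemma pvFoldMin_perm {l l' : List Int} (h : l.Perm l') (m : Int) :
    l.foldl (fun a v => min v a) m = l'.foldl (fun a v => min v a) m := by
  apply h.foldl_eq

-- binary-search correctness on a list that is monotone in its indices
lemma pvBsearch_spec (vals : List Int) (average : Int)
    (mono : ∀ p q : Nat, (hpq : p ≤ q) → (hq : q < vals.length) → vals[p]'(by omega) ≤ vals[q]) :
    ∀ (lo hi : Nat), lo ≤ hi → hi ≤ vals.length →
    (∀ i : Nat, i < lo → (hi' : i < vals.length) → vals[i] < average) →
    (∀ i : Nat, hi ≤ i → (hi' : i < vals.length) → average ≤ vals[i]) →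
    let r := pvBsearch vals average lo hi
    r ≤ vals.length ∧
    (∀ i : Nat, i < r → (hi' : i < vals.length) → vals[i] < average) ∧
    (∀ i : Nat, r ≤ i → (hi' : i < vals.length) → average ≤ vals[i]) := by
  intro lo hi
  induction' hfuel : hi - lo using Nat.strong_induction_on with n ih generalizing lo hi
  intro hlohi hhilen hbelow habove
  rw [pvBsearch]
  by_cases h : lo < hi
  · simp only [h, dif_pos]
    have hmid : (lo + hi) / 2 < hi := by omega
    have hmidlo : lo ≤ (lo + hi) / 2 := by omega
    have hmidlen : (lo + hi) / 2 < vals.length := by omega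
    rw [List.getD_eq_getElem _ _ hmidlen]
    by_cases hv : vals[(lo + hi) / 2] < average
    · simp only [hv, if_pos]
      exact ih (hi - ((lo + hi) / 2 + 1)) (by omega) _ _ rfl (by omega) hhilen
        (by
          intro i hilt hlen
          exact lt_of_le_of_lt (mono i ((lo + hi) / 2) (by omega) hmidlen) hv)
        habove
    · simp only [hv, reduceIte]
      exact ih ((lo + hi) / 2 - lo) (by omega) _ _ rfl (by omega) (by omega)
        hbelow
        (by
          intro i hile hlen
          exact le_trans (le_of_not_gt hv) (mono ((lo + hi) / 2) i hile hlen))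
  · simp only [h, dif_neg, not_false_iff]
    have : lo = hi := by omega
    subst this
    exact ⟨hhilen, hbelow, habove⟩

-- on an index-monotone list, the filter of the survivors is the suffix from the split point
lemma pvFilter_drop (vals : List Int) (average : Int) (r : Nat) (hr : r ≤ vals.length)
    (hbelow : ∀ i : Nat, i < r → (hi' : i < vals.length) → vals[i] < average)
    (habove : ∀ i : Nat, r ≤ i → (hi' : i < vals.length) → average ≤ vals[i]) :
    vals.filter (fun v => average ≤ v) = vals.drop r := by
  conv_lhs => rw [← List.take_append_drop r vals]
  rw [List.filter_append]
  have h1 : (vals.take r).filter (fun v => average ≤ v) = [] := by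
    rw [List.filter_eq_nil_iff]
    intro x hx
    obtain ⟨i, hi, rfl⟩ := List.mem_iff_getElem.mp hx
    simp only [List.length_take] at hi
    rw [List.getElem_take]
    have := hbelow i (by omega) (by omega)
    simpa using Int.not_le.mpr this
  have h2 : (vals.drop r).filter (fun v => average ≤ v) = vals.drop r := by
    rw [List.filter_eq_self]
    intro x hx
    obtain ⟨i, hi, rfl⟩ := List.mem_iff_getElem.mp hx
    simp only [List.length_drop] at hi
    rw [List.getElem_drop]
    simpa using habove (r + i) (by omega) (by omega)
  rw [h1, h2, List.nil_append]

-- the min-fold of a list whose head bounds everything (including the seed) is the head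
lemma pvFoldMin_head (x : Int) (t : List Int) (m : Int) (hx : x ≤ m)
    (ht : ∀ y ∈ t, x ≤ y) :
    (x :: t).foldl (fun a v => min v a) m = x := by
  simp only [List.foldl_cons, min_eq_left hx]
  induction t with
  | nil => rfl
  | cons y s ihs =>
    have hy : x ≤ y := ht y (by simp)
    simp only [List.foldl_cons, min_eq_right hy]
    exact ihs (fun z hz => ht z (by simp [hz]))

-- ===== VERDICT (by name: the statement is the Claim_ definition above) =====
theorem remove_trashold_py_spec : Claim_equal_remove_trashold_py := by
  intro grid average hDom
  unfold Spec_remove_trashold_py remove_trashold_py remove_trashold_py_alt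
  dsimp only
  rw [pvA_snd, pvA_filter]
  set vals := PySem.List.sorted (grid.map Prod.snd) (fun v => v) false with hvals
  -- every value is ≤ 2^31 < 100000000000 (Dom)
  have hbound : ∀ v ∈ vals, v ≤ (100000000000 : Int) := by
    intro v hv
    have hv' : v ∈ grid.map Prod.snd := (PySem.List.sorted_perm _ _ _).mem_iff.mp hv
    obtain ⟨kv, hkv, rfl⟩ := List.mem_map.mp hv'
    unfold Dom_remove_trashold_py at hDom
    simp only [Bool.and_eq_true, List.all_eq_true] at hDom
    have := hDom.1 kv hkv
    simp only [pvDomInt, decide_eq_true_eq] at this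
    omega
  -- index-monotonicity of the sorted list
  have mono : ∀ p q : Nat, (hpq : p ≤ q) → (hq : q < vals.length) → vals[p]'(by omega) ≤ vals[q] := by
    intro p q hpq hq
    exact PySem.List.sorted_id_getElem_mono (grid.map Prod.snd) hpq hq
  have hspec := pvBsearch_spec vals average mono 0 vals.length (by omega) le_rfl
    (by intro i hi _; omega) (by intro i hi hlen; omega)
  set r := pvBsearch vals average 0 vals.length with hr
  obtain ⟨hrlen, hbelow, habove⟩ := hspec
  -- A's fold over the filtered values = fold over the filtered sorted values = fold over the suffix
  have hperm : ((grid.map Prod.snd).filter (fun v => average ≤ v)).Perm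
      (vals.filter (fun v => average ≤ v)) :=
    ((PySem.List.sorted_perm (grid.map Prod.snd) (fun v => v) false).symm).filter _
  rw [pvFoldMin_perm hperm, pvFilter_drop vals average r hrlen hbelow habove]
  split
  case isTrue h =>
    rw [List.drop_eq_getElem_cons h]
    apply pvFoldMin_head
    · exact hbound _ (List.getElem_mem h)
    · intro y hy
      obtain ⟨i, hi, rfl⟩ := List.mem_iff_getElem.mp hy
      simp only [List.length_drop] at hi
      rw [List.getElem_drop]
      exact mono r (r + 1 + i) (by omega) (by omega)
  case isFalse h =>
    rw [List.drop_eq_nil_of_le (by omega)]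
    rfl
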